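-- pv_equiv track=rewrite | github.com/Reemostat/Rl_Multi_Agent_Code_Optimizer | experiments/dataset/sample_421.py | analyze_list_5
-- ===== SOURCE A (Python) =====
-- def analyze_list_5(items):
--     positives = []
--     for item in items:
--         if item > 0:
--             positives.append(item)
--
--     evens = []
--     for item in items:
--         if item % 2 == 0:
--             evens.append(item)
--
--     large = []
--     for item in items:
--         if item > 50:
--             large.append(item)
--
--     return len(positives), len(evens), len(large)
-- ===== SOURCE B (Python) =====
-- def analyze_list_5(items):
--     pos = even = large = 0
--     for item in items:
--         if item > 0:
--             pos += 1
--         if item % 2 == 0: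
--             even += 1
--         if item > 50:
--             large += 1
--     return pos, even, large
-- ===== Notes on version B (the rewrite author's own statement) =====
-- stated objective: simpler
-- what changed: Replaces three list-building passes (and len of each list) with a single pass that maintains three integer counters and allocates no intermediate lists.
import Mathlib
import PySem

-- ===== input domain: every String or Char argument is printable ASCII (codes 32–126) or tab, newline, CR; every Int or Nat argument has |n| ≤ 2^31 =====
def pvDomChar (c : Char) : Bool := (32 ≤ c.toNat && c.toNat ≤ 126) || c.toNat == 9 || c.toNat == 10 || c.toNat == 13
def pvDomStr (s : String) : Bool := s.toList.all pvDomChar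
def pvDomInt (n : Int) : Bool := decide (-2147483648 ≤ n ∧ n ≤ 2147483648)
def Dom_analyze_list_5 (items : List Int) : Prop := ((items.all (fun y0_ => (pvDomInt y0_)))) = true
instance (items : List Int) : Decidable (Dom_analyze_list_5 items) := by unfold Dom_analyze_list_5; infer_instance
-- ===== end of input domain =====

-- B replaces A's three list-building passes with one pass over three integer counters ("simpler").

-- ===== PORT A =====
-- A builds three lists by separate passes and returns their lengths.
def analyze_list_5 (items : List Int) : Int × Int × Int :=
  let positives := items.foldl (fun acc item => if item > 0 then acc ++ [item] else acc) []
  let evens := items.foldl (fun acc item => if PySem.Int.mod item 2 = 0 then acc ++ [item] else acc) []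
  let large := items.foldl (fun acc item => if item > 50 then acc ++ [item] else acc) []
  ((positives.length : Int), (evens.length : Int), (large.length : Int))

-- ===== PORT B =====
-- B: one pass maintaining three counters; the loop body is stepB.
def stepB (s : Int × Int × Int) (item : Int) : Int × Int × Int :=
  let s := if item > 0 then (s.1 + 1, s.2.1, s.2.2) else s
  let s := if PySem.Int.mod item 2 = 0 then (s.1, s.2.1 + 1, s.2.2) else s
  let s := if item > 50 then (s.1, s.2.1, s.2.2 + 1) else s
  s

def analyze_list_5_alt (items : List Int) : Int × Int × Int :=
  items.foldl stepB (0, 0, 0)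

-- ===== PRECONDITION & SPEC =====
def Spec_analyze_list_5 (items : List Int) (out : Int × Int × Int) : Prop := out = analyze_list_5_alt items
instance (items : List Int) (out : Int × Int × Int) : Decidable (Spec_analyze_list_5 items out) := by unfold Spec_analyze_list_5; infer_instance

-- ===== CLAIM =====
def Claim_equal_analyze_list_5 : Prop := ∀ (items : List Int), Dom_analyze_list_5 items → Spec_analyze_list_5 items (analyze_list_5 items)

-- ===== LEMMAS AND PROOFS =====

-- one B step adds the three indicator values
lemma stepB_eq (a b c : Int) (x : Int) :
    stepB (a, b, c) x
      = (a + (if x > 0 then 1 else 0),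
         b + (if PySem.Int.mod x 2 = 0 then 1 else 0),
         c + (if x > 50 then 1 else 0)) := by
  unfold stepB
  by_cases h1 : x > 0 <;> by_cases h2 : PySem.Int.mod x 2 = 0 <;> by_cases h3 : x > 50 <;>
    simp only [h1, h2, h3, if_pos, if_neg, not_false_iff] <;> simp

-- a filtering foldl extends the accumulator by the filtered list
lemma filter_foldl (p : Int → Prop) [DecidablePred p] (items : List Int) (acc : List Int) :
    items.foldl (fun acc item => if p item then acc ++ [item] else acc) acc
      = acc ++ items.filter (fun i => decide (p i)) := by
  induction items generalizing acc with
  | nil => simp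
  | cons x xs ih =>
    simp only [List.foldl_cons, List.filter_cons]
    by_cases h : p x <;> simp [h, ih]

-- B's fold computes the three filter-counts
lemma alt_counts (items : List Int) (a b c : Int) :
    items.foldl stepB (a, b, c)
    = (a + ((items.filter (fun i => decide (i > 0))).length : Int),
       b + ((items.filter (fun i => decide (PySem.Int.mod i 2 = 0))).length : Int),
       c + ((items.filter (fun i => decide (i > 50))).length : Int)) := by
  induction items generalizing a b c with
  | nil => simp
  | cons x xs ih =>
    rw [List.foldl_cons, stepB_eq, ih]
    simp only [List.filter_cons]
    by_cases h1 : x > 0 <;> by_cases h2 : PySem.Int.mod x 2 = 0 <;> by_cases h3 : x > 50 <;>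
      simp only [h1, h2, h3, decide_true, decide_false, if_true, if_false,
        List.length_cons, Prod.mk.injEq] <;>
      refine ⟨by push_cast; ring, by push_cast; ring, by push_cast; ring⟩

-- ===== VERDICT =====
theorem analyze_list_5_spec : Claim_equal_analyze_list_5 := by
  intro items _
  unfold Spec_analyze_list_5 analyze_list_5 analyze_list_5_alt
  rw [alt_counts,
    filter_foldl (fun i => i > 0),
    filter_foldl (fun i => PySem.Int.mod i 2 = 0),
    filter_foldl (fun i => i > 50)]
  simp only [List.nil_append, zero_add]
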